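-- pv_equiv track=rewrite | github.com/pmnxis/Cinema_statics | cinema.py | cleanRoomName
-- ===== SOURCE A (Python) =====
-- import copy
--
-- def cleanRoomName(name):
--     temp = name.split('(')
--     name = copy.copy(temp[0])
--     name = name.encode('ascii', 'ignore')
--     name = name.decode('utf-8')
--     condition = False
--
--     while condition:
--         condition = False
--
--         if(name[0] == ' '):
--                 condition = True
--                 name = name[1:]
--
--         if(name[-1] == ' '):
--                 condition = True
--                 name = name[:-1]
--
--     return name
-- ===== SOURCE B (Python) =====
-- def cleanRoomName(name):
--     out = []
--     for c in name:
--         if c == '(':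
--             break
--         if ord(c) < 128:
--             out.append(c)
--     return ''.join(out)
-- ===== Notes on version B (the rewrite author's own statement) =====
-- stated objective: simpler
-- what changed: B replaces A's separate split-at-first-open-parenthesis pass, ascii-ignore encode/decode pass and dead while-loop by a single character traversal that breaks at the first open parenthesis and keeps only chars with ord below 128.
import Mathlib
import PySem

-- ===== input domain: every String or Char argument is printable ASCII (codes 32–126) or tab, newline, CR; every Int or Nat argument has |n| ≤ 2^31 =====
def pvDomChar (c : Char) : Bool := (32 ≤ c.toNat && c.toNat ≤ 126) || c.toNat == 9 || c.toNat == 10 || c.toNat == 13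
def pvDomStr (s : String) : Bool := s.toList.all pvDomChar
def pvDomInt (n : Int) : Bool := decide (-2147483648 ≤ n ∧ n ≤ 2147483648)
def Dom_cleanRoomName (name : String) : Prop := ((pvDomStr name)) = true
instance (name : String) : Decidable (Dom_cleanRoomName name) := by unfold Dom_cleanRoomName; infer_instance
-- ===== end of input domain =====

-- B fuses A's split-at-first-open-paren truncation and ascii-ignore filtering into one guarded traversal (objective: simpler).


-- ===== PORT A =====
def cleanRoomName (name : String) : String :=
  let temp := PySem.Chars.splitOn name.toList ['(']          -- temp = name.split('(')
  let name1 := (PySem.List.pyGet? temp 0).getD []            -- name = copy.copy(temp[0]); split never returns []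
  let name2 := name1.filter (fun c => c.toNat < 128)         -- name.encode('ascii','ignore').decode('utf-8')
  -- condition = False; the while loop guard is False on entry, so its body never executes
  String.ofList name2

-- ===== PORT B =====
-- one pass: break on '(', keep c with ord(c) < 128
def cleanAux : List Char → List Char
  | [] => []
  | c :: rest =>
    if c = '(' then []
    else if c.toNat < 128 then c :: cleanAux rest else cleanAux rest

def cleanRoomName_alt (name : String) : String :=
  String.ofList (cleanAux name.toList)

-- ===== PRECONDITION & SPEC =====
def Spec_cleanRoomName (name : String) (out : String) : Prop := out = cleanRoomName_alt name
instance (name : String) (out : String) : Decidable (Spec_cleanRoomName name out) := by unfold Spec_cleanRoomName; infer_instance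

-- ===== CLAIM (what is proved, stated in full; the proofs are below) =====
def Claim_equal_cleanRoomName : Prop := ∀ (name : String), Dom_cleanRoomName name → Spec_cleanRoomName name (cleanRoomName name)

-- ===== LEMMAS AND PROOFS =====

-- splitOn.go always produces acc.reverse ++ something
theorem go_acc (sep : List Char) (fuel : Nat) :
    ∀ (l cur : List Char) (accs : List (List Char)),
      ∃ t, PySem.Chars.splitOn.go sep fuel l cur accs = accs.reverse ++ t := by
  induction fuel with
  | zero =>
    intro l cur accs
    exact ⟨[(cur.reverse ++ l)], by simp [PySem.Chars.splitOn.go]⟩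
  | succ n ih =>
    intro l cur accs
    cases l with
    | nil => exact ⟨[cur.reverse], by simp [PySem.Chars.splitOn.go]⟩
    | cons c rest =>
      by_cases h : sep.isPrefixOf (c :: rest) = true
      · obtain ⟨t, ht⟩ := ih (List.drop sep.length (c :: rest)) [] (cur.reverse :: accs)
        exact ⟨cur.reverse :: t, by simp [PySem.Chars.splitOn.go, h, ht]⟩
      · obtain ⟨t, ht⟩ := ih rest (c :: cur) accs
        exact ⟨t, by simp [PySem.Chars.splitOn.go, h, ht]⟩

-- the first piece of splitOn on '(' is the takeWhile-before-'(' prefix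
theorem go_head (fuel : Nat) :
    ∀ (l cur : List Char) (accs : List (List Char)), l.length ≤ fuel →
      ∃ t, PySem.Chars.splitOn.go ['('] fuel l cur accs
           = accs.reverse ++ (cur.reverse ++ l.takeWhile (fun c => c ≠ '(')) :: t := by
  induction fuel with
  | zero =>
    intro l cur accs hl
    have : l = [] := List.eq_nil_of_length_eq_zero (Nat.le_zero.mp hl)
    subst this
    exact ⟨[], by simp [PySem.Chars.splitOn.go]⟩
  | succ n ih =>
    intro l cur accs hl
    cases l with
    | nil => exact ⟨[], by simp [PySem.Chars.splitOn.go]⟩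
    | cons c rest =>
      by_cases hc : c = '('
      · subst hc
        have hpre : List.isPrefixOf ['('] ('(' :: rest) = true := by
          simp [List.isPrefixOf]
        obtain ⟨t, ht⟩ := go_acc ['('] n rest [] (cur.reverse :: accs)
        refine ⟨t, ?_⟩
        simp [PySem.Chars.splitOn.go, hpre, List.takeWhile, ht]
      · have hpre : List.isPrefixOf ['('] (c :: rest) = false := by
          simp [List.isPrefixOf]; exact fun h => (hc h.symm).elim
        obtain ⟨t, ht⟩ := ih rest (c :: cur) accs (by simpa using Nat.le_of_succ_le_succ hl)
        refine ⟨t, ?_⟩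
        simp [PySem.Chars.splitOn.go, hpre, ht, List.takeWhile, hc]

-- B's fused pass = filter after takeWhile
theorem cleanAux_eq (l : List Char) :
    cleanAux l = (l.takeWhile (fun c => c ≠ '(')).filter (fun c => c.toNat < 128) := by
  induction l with
  | nil => simp [cleanAux]
  | cons c rest ih =>
    by_cases hc : c = '('
    · subst hc; simp [cleanAux, List.takeWhile]
    · by_cases ha : c.toNat < 128 <;>
        simp [cleanAux, hc, ha, List.takeWhile, ih]

-- ===== VERDICT (by name: the statement is the Claim_ definition above) =====
theorem cleanRoomName_spec : Claim_equal_cleanRoomName := by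
  intro name _
  unfold Spec_cleanRoomName cleanRoomName cleanRoomName_alt
  obtain ⟨t, ht⟩ := go_head (name.toList.length + 1) name.toList [] []
    (Nat.le_succ _)
  simp only [PySem.Chars.splitOn, ht, List.reverse_nil, List.nil_append]
  simp [PySem.List.pyGet?, PySem.List.pyIdx?, cleanAux_eq]
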